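-- pv_equiv track=rewrite | github.com/vincentBenet/static_analysis | source/static_analysis.py | get_liaison_parts
-- ===== SOURCE A (Python) =====
-- def get_liaison_parts(liaisons, parts):
--     res = {}
--     for liaison in liaisons:
--         res[liaison] = []
--         for part, liaisions_part in parts.items():
--             if liaison in liaisions_part:
--                 res[liaison].append(part)
--     return res
-- ===== SOURCE B (Python) =====
-- def get_liaison_parts(liaisons, parts):
--     inv = {}
--     for part, liaisions_part in parts.items():
--         for liaison in dict.fromkeys(liaisions_part):
--             inv.setdefault(liaison, []).append(part)
--     return {liaison: inv.get(liaison, []) for liaison in liaisons}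
-- ===== Notes on version B (the rewrite author's own statement) =====
-- stated objective: faster
-- what changed: B replaces A's per-liaison scan of all parts by a single pass that builds an inverted index (liaison -> parts containing it) from the parts dict alone, then produces the result with one lookup per liaison; A's inner scan disappears.
import Mathlib
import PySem

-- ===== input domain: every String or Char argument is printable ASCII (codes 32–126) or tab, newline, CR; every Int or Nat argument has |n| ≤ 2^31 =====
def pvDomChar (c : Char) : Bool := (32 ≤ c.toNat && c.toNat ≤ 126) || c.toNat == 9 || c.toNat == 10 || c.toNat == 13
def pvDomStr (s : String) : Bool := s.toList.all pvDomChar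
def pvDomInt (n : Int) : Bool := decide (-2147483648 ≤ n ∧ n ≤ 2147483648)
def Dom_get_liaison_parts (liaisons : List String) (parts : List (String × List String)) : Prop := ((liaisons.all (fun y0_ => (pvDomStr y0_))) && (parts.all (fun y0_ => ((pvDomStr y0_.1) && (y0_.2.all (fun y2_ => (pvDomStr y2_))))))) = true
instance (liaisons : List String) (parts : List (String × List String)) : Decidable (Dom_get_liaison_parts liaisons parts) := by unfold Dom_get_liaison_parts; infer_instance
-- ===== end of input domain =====

-- B builds an inverted index (liaison -> parts containing it) in ONE pass over the parts dict,
-- then answers each liaison with a single lookup (objective: faster, A's inner scan disappears).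
-- ===== PORT A =====
def get_liaison_parts (liaisons : List String) (parts : List (String × List String)) : List (String × List String) :=
  (liaisons.foldl
    (fun res liaison =>
      parts.foldl
        (fun res p =>
          if liaison ∈ p.2 then PySem.Dict.modify res liaison [] (fun v => v ++ [p.1]) else res)
        (PySem.Dict.insert res liaison []))
    PySem.Dict.empty).items

-- ===== PORT B =====
def get_liaison_parts_alt (liaisons : List String) (parts : List (String × List String)) : List (String × List String) :=
  let inv : PySem.Dict String (List String) :=
    parts.foldl
      (fun inv p =>
        (PySem.List.dedup p.2).foldl
          (fun inv liaison => PySem.Dict.modify inv liaison [] (fun v => v ++ [p.1]))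
          inv)
      PySem.Dict.empty
  (liaisons.foldl
      (fun res liaison => PySem.Dict.insert res liaison (inv.getD liaison []))
      PySem.Dict.empty).items

-- ===== PRECONDITION & SPEC =====
def Spec_get_liaison_parts (liaisons : List String) (parts : List (String × List String)) (out : List (String × List String)) : Prop := out = get_liaison_parts_alt liaisons parts
instance (liaisons : List String) (parts : List (String × List String)) (out : List (String × List String)) : Decidable (Spec_get_liaison_parts liaisons parts out) := by unfold Spec_get_liaison_parts; infer_instance

-- ===== CLAIM (what is proved, stated in full; the proofs are below) =====
def Claim_equal_get_liaison_parts : Prop := ∀ (liaisons : List String) (parts : List (String × List String)), Dom_get_liaison_parts liaisons parts → Spec_get_liaison_parts liaisons parts (get_liaison_parts liaisons parts)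

-- ===== LEMMAS AND PROOFS =====

-- canonical dict: keys ks, value f k at key k
def pvMD (ks : List String) (f : String → List String) : PySem.Dict String (List String) :=
  PySem.Dict.mk (ks.map (fun k => (k, f k)))

-- first-occurrence key union, as the insert/modify loops produce it
def pvU (ks ls : List String) : List String :=
  ls.foldl (fun ks a => if a ∈ ks then ks else ks ++ [a]) ks

-- keys accumulated by B's inverted-index pass
def pvKU (ks : List String) (ps : List (String × List String)) : List String :=
  ps.foldl (fun ks p => pvU ks (PySem.List.dedup p.2)) ks

-- the value both programs compute for liaison l: keys of the parts containing l
def pvVal (l : String) (ps : List (String × List String)) : List String :=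
  (ps.filter (fun p => decide (l ∈ p.2))).map (fun p => p.1)

theorem pvMD_congr {ks : List String} {f g : String → List String}
    (h : ∀ x ∈ ks, f x = g x) : pvMD ks f = pvMD ks g := by
  unfold pvMD
  exact congrArg PySem.Dict.mk (List.map_congr_left (fun x hx => by rw [h x hx]))

theorem pv_contains_md (ks : List String) (f : String → List String) (k : String) :
    (pvMD ks f).contains k = decide (k ∈ ks) := by
  induction ks with
  | nil => simp [pvMD, PySem.Dict.contains]
  | cons a t ih =>
      simp only [pvMD, PySem.Dict.contains, List.map_cons, List.any_cons] at ih ⊢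
      by_cases h : a = k
      · subst h; simp
      · have h' : ¬ k = a := fun hh => h hh.symm
        simp [h, h', ih]

theorem pv_getD_md (ks : List String) (f : String → List String) (k : String)
    (hk : k ∈ ks) (d0 : List String) : (pvMD ks f).getD k d0 = f k := by
  induction ks with
  | nil => simp at hk
  | cons a t ih =>
      by_cases h : a = k
      · subst h; simp [pvMD, PySem.Dict.getD, PySem.Dict.get?]
      · have hk' : k ∈ t := by
          rcases List.mem_cons.mp hk with h1 | h1
          · exact absurd h1.symm h
          · exact h1
        simpa [pvMD, PySem.Dict.getD, PySem.Dict.get?, h] using ih hk'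

theorem pv_getD_md_not (ks : List String) (f : String → List String) (k : String)
    (hk : k ∉ ks) (d0 : List String) : (pvMD ks f).getD k d0 = d0 := by
  apply PySem.Dict.getD_of_not_contains
  simp [pv_contains_md, hk]

theorem pv_insert_md_mem (ks : List String) (f : String → List String) (k : String)
    (hk : k ∈ ks) (w : List String) :
    (pvMD ks f).insert k w = pvMD ks (fun x => if x = k then w else f x) := by
  have hc : (pvMD ks f).contains k = true := by simp [pv_contains_md, hk]
  unfold PySem.Dict.insert
  rw [hc, if_pos rfl]
  unfold pvMD
  congr 1
  simp only [List.map_map]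
  refine List.map_congr_left (fun x _ => ?_)
  by_cases h : x = k <;> simp [h]

theorem pv_insert_md_not_mem (ks : List String) (f : String → List String) (k : String)
    (hk : k ∉ ks) (w : List String) :
    (pvMD ks f).insert k w = pvMD (ks ++ [k]) (fun x => if x = k then w else f x) := by
  have hc : (pvMD ks f).contains k = false := by simp [pv_contains_md, hk]
  unfold PySem.Dict.insert
  rw [hc, if_neg (by simp)]
  unfold pvMD
  congr 1
  rw [List.map_append]
  congr 1
  · refine List.map_congr_left (fun x hx => ?_)
    have : x ≠ k := fun h => hk (h ▸ hx)
    simp [this]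
  · simp

-- insert with a (possibly new) key, uniformly
theorem pv_insert_md (ks : List String) (f : String → List String) (k : String) (w : List String) :
    (pvMD ks f).insert k w
    = pvMD (if k ∈ ks then ks else ks ++ [k]) (fun x => if x = k then w else f x) := by
  by_cases h : k ∈ ks
  · rw [if_pos h]; exact pv_insert_md_mem ks f k h w
  · rw [if_neg h]; exact pv_insert_md_not_mem ks f k h w

-- modify with default [] acts as setdefault-append
theorem pv_modify_md (ks : List String) (f : String → List String) (k : String) (a : String) :
    PySem.Dict.modify (pvMD ks f) k [] (fun v => v ++ [a])
    = pvMD (if k ∈ ks then ks else ks ++ [k])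
        (fun x => if x = k then (if k ∈ ks then f k else []) ++ [a] else f x) := by
  unfold PySem.Dict.modify
  by_cases h : k ∈ ks
  · rw [pv_getD_md ks f k h, pv_insert_md, if_pos h]
    simp [h]
  · rw [pv_getD_md_not ks f k h, pv_insert_md, if_neg h]
    simp [h]

theorem pv_mem_U (ks ls : List String) (x : String) (hx : x ∈ pvU ks ls) :
    x ∈ ks ∨ x ∈ ls := by
  induction ls generalizing ks with
  | nil => exact Or.inl hx
  | cons l t ih =>
      simp only [pvU, List.foldl_cons] at hx
      rcases ih _ hx with h | h
      · by_cases hl : l ∈ ks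
        · rw [if_pos hl] at h; exact Or.inl h
        · rw [if_neg hl] at h
          rcases List.mem_append.mp h with h1 | h1
          · exact Or.inl h1
          · simp at h1; subst h1; exact Or.inr (by simp)
      · exact Or.inr (by simp [h])

theorem pv_U_mem_left (ks ls : List String) (x : String) (hx : x ∈ ks) : x ∈ pvU ks ls := by
  induction ls generalizing ks with
  | nil => exact hx
  | cons l t ih =>
      simp only [pvU, List.foldl_cons]
      apply ih
      by_cases h : l ∈ ks <;> simp [h, hx]

theorem pv_U_mem_right (ks ls : List String) (x : String) (hx : x ∈ ls) : x ∈ pvU ks ls := by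
  induction ls generalizing ks with
  | nil => simp at hx
  | cons l t ih =>
      simp only [pvU, List.foldl_cons]
      rcases List.mem_cons.mp hx with h | h
      · subst h
        apply pv_U_mem_left
        by_cases h : x ∈ ks <;> simp [h]
      · exact ih _ h

theorem pv_KU_mem_left (ks : List String) (ps : List (String × List String)) (x : String)
    (hx : x ∈ ks) : x ∈ pvKU ks ps := by
  induction ps generalizing ks with
  | nil => exact hx
  | cons p t ih =>
      simp only [pvKU, List.foldl_cons] at ih ⊢
      exact ih _ (pv_U_mem_left _ _ _ hx)

-- a liaison outside B's accumulated keys occurs in no part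
theorem pv_KU_not_mem (ks : List String) (ps : List (String × List String)) (x : String)
    (hx : x ∉ pvKU ks ps) : pvVal x ps = [] := by
  induction ps generalizing ks with
  | nil => rfl
  | cons p t ih =>
      simp only [pvKU, List.foldl_cons] at hx
      have hks' : x ∉ pvU ks (PySem.List.dedup p.2) :=
        fun h => hx (pv_KU_mem_left _ _ _ h)
      have hxp : x ∉ p.2 := by
        intro h
        exact hks' (pv_U_mem_right _ _ _ (by simpa using h))
      simp only [pvVal, List.filter_cons]
      rw [if_neg (by simp [hxp])]
      exact ih _ hx

-- A's inner loop over parts, at liaison l (key already present)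
theorem pv_innerA (ps : List (String × List String)) (ks : List String)
    (f : String → List String) (l : String) (hl : l ∈ ks) :
    ps.foldl
      (fun res p => if l ∈ p.2 then PySem.Dict.modify res l [] (fun v => v ++ [p.1]) else res)
      (pvMD ks f)
    = pvMD ks (fun x => if x = l then f l ++ pvVal l ps else f x) := by
  induction ps generalizing f with
  | nil =>
      simp only [List.foldl_nil]
      refine (pvMD_congr (fun x _ => ?_)).symm
      by_cases h : x = l <;> simp [h, pvVal]
  | cons p t ih =>
      simp only [List.foldl_cons]
      by_cases hp : l ∈ p.2
      · rw [if_pos hp, pv_modify_md, if_pos hl]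
        rw [ih _]
        have : (if l ∈ ks then ks else ks ++ [l]) = ks := by simp [hl]
        rw [this] at *
        refine pvMD_congr (fun x _ => ?_)
        by_cases h : x = l <;> simp [h, hl, pvVal, hp]
      · rw [if_neg hp]
        rw [ih f]
        refine pvMD_congr (fun x _ => ?_)
        by_cases h : x = l <;> simp [h, pvVal, hp]

-- A's outer loop over liaisons
theorem pv_outerA (parts : List (String × List String)) (ls ks : List String)
    (f : String → List String) :
    ls.foldl
      (fun res liaison =>
        parts.foldl
          (fun res p => if liaison ∈ p.2 then PySem.Dict.modify res liaison [] (fun v => v ++ [p.1]) else res)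
          (PySem.Dict.insert res liaison []))
      (pvMD ks f)
    = pvMD (pvU ks ls) (fun x => if x ∈ ls then pvVal x parts else f x) := by
  induction ls generalizing ks f with
  | nil =>
      simp only [List.foldl_nil, pvU, List.foldl_nil]
      exact (pvMD_congr (fun x _ => by simp)).symm
  | cons l t ih =>
      simp only [List.foldl_cons]
      have hU : pvU ks (l :: t) = pvU (if l ∈ ks then ks else ks ++ [l]) t := by
        simp only [pvU, List.foldl_cons]
      have hlmem : l ∈ (if l ∈ ks then ks else ks ++ [l]) := by
        by_cases h : l ∈ ks <;> simp [h]
      rw [pv_insert_md, pv_innerA parts _ _ l hlmem, ih, hU]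
      refine pvMD_congr (fun x _ => ?_)
      by_cases hx : x ∈ t
      · simp [hx]
      · by_cases hxl : x = l <;> simp [hx, hxl]

-- B's inner loop: unconditional setdefault-append over the deduplicated liaisons of one part
theorem pv_innerB (S : List String) (ks : List String) (f : String → List String)
    (a : String) (hS : S.Nodup) :
    S.foldl
      (fun inv liaison => PySem.Dict.modify inv liaison [] (fun v => v ++ [a]))
      (pvMD ks f)
    = pvMD (pvU ks S)
        (fun x => if x ∈ S then (if x ∈ ks then f x else []) ++ [a] else f x) := by
  induction S generalizing ks f with
  | nil =>
      simp only [List.foldl_nil, pvU, List.foldl_nil]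
      exact (pvMD_congr (fun x _ => by simp)).symm
  | cons l t ih =>
      have hlt : l ∉ t := (List.nodup_cons.mp hS).1
      have ht : t.Nodup := (List.nodup_cons.mp hS).2
      simp only [List.foldl_cons]
      have hU : pvU ks (l :: t) = pvU (if l ∈ ks then ks else ks ++ [l]) t := by
        simp only [pvU, List.foldl_cons]
      rw [pv_modify_md, ih _ _ ht, hU]
      refine pvMD_congr (fun x _ => ?_)
      by_cases hxl : x = l
      · subst hxl
        by_cases h : x ∈ ks <;> simp [hlt, h]
      · have hmem : (x ∈ if l ∈ ks then ks else ks ++ [l]) ↔ x ∈ ks := by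
          by_cases h : l ∈ ks <;> simp [h, hxl]
        by_cases hxt : x ∈ t
        · simp [hxt, hxl, hmem]
        · simp [hxt, hxl]

-- B's outer loop: the inverted index over a list of parts
theorem pv_outerB (ps : List (String × List String)) (ks : List String)
    (f : String → List String) :
    ps.foldl
      (fun inv p =>
        (PySem.List.dedup p.2).foldl
          (fun inv liaison => PySem.Dict.modify inv liaison [] (fun v => v ++ [p.1]))
          inv)
      (pvMD ks f)
    = pvMD (pvKU ks ps)
        (fun x => (if x ∈ ks then f x else []) ++ pvVal x ps) := by
  induction ps generalizing ks f with
  | nil =>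
      simp only [List.foldl_nil, pvKU]
      refine (pvMD_congr (fun x hx => ?_)).symm
      simp [pvVal, hx]
  | cons p t ih =>
      simp only [List.foldl_cons]
      rw [pv_innerB (PySem.List.dedup p.2) ks f p.1 (by simp), ih]
      have hKU : pvKU ks (p :: t) = pvKU (pvU ks (PySem.List.dedup p.2)) t := by
        simp only [pvKU, List.foldl_cons]
      rw [hKU]
      refine pvMD_congr (fun x _ => ?_)
      have hdm : x ∈ PySem.List.dedup p.2 ↔ x ∈ p.2 := by simp
      have hval : pvVal x (p :: t) = (if x ∈ p.2 then [p.1] else []) ++ pvVal x t := by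
        simp only [pvVal, List.filter_cons]
        by_cases h : x ∈ p.2 <;> simp [h]
      by_cases hU : x ∈ pvU ks (PySem.List.dedup p.2)
      · rw [if_pos hU]
        by_cases hp2 : x ∈ p.2
        · have hS : x ∈ PySem.List.dedup p.2 := hdm.mpr hp2
          rw [hval]
          by_cases hks : x ∈ ks <;> simp [hS, hks, hp2]
        · have hS : x ∉ PySem.List.dedup p.2 := fun h => hp2 (hdm.mp h)
          have hks : x ∈ ks := by
            rcases pv_mem_U _ _ _ hU with h | h
            · exact h
            · exact absurd h hS
          rw [hval]
          simp [hS, hks, hp2]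
      · rw [if_neg hU]
        have hks : x ∉ ks := fun h => hU (pv_U_mem_left _ _ _ h)
        have hS : x ∉ PySem.List.dedup p.2 := fun h => hU (pv_U_mem_right _ _ _ h)
        rw [hval, if_neg (fun h => hS (hdm.mpr h))]
        simp [hks, hS]

-- B's final pass: one insert-with-lookup per liaison
theorem pv_finalB (ls ks : List String) (f g : String → List String) :
    ls.foldl (fun res liaison => PySem.Dict.insert res liaison (g liaison)) (pvMD ks f)
    = pvMD (pvU ks ls) (fun x => if x ∈ ls then g x else f x) := by
  induction ls generalizing ks f with
  | nil =>
      simp only [List.foldl_nil, pvU, List.foldl_nil]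
      exact (pvMD_congr (fun x _ => by simp)).symm
  | cons l t ih =>
      simp only [List.foldl_cons]
      have hU : pvU ks (l :: t) = pvU (if l ∈ ks then ks else ks ++ [l]) t := by
        simp only [pvU, List.foldl_cons]
      rw [pv_insert_md, ih, hU]
      refine pvMD_congr (fun x _ => ?_)
      by_cases hx : x ∈ t
      · simp [hx]
      · by_cases hxl : x = l <;> simp [hx, hxl]

-- ===== VERDICT (by name: the statement is the Claim_ definition above) =====
theorem get_liaison_parts_spec : Claim_equal_get_liaison_parts := by
  unfold Claim_equal_get_liaison_parts
  intro liaisons parts _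
  unfold Spec_get_liaison_parts get_liaison_parts get_liaison_parts_alt
  have hempty : (PySem.Dict.empty : PySem.Dict String (List String)) = pvMD [] (fun _ => []) := rfl
  simp only [hempty]
  rw [pv_outerA parts liaisons [] (fun _ => []),
      pv_outerB parts [] (fun _ => []),
      pv_finalB liaisons [] (fun _ => [])
        (fun l => (pvMD (pvKU [] parts)
            (fun x => (if x ∈ ([] : List String) then [] else []) ++ pvVal x parts)).getD l [])]
  apply congrArg PySem.Dict.items
  refine pvMD_congr (fun x hx => ?_)
  have hxl : x ∈ liaisons := by
    rcases pv_mem_U [] liaisons x hx with h | h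
    · simp at h
    · exact h
  rw [if_pos hxl, if_pos hxl]
  by_cases hK : x ∈ pvKU [] parts
  · rw [pv_getD_md _ _ _ hK]
    simp
  · rw [pv_getD_md_not _ _ _ hK, pv_KU_not_mem [] parts x hK]
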